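-- pv_equiv track=rewrite | github.com/Ibraam-Robil/ARL-2026-Public-Mission | Coding_Assignments/Sensor_Fusion/Question.py | fuse_readings
-- ===== SOURCE A (Python) =====
-- def fuse_readings(sensor1: list[int], sensor2: list[int], sensor3: list[int]) -> list:
--
--     fused = []
--
--     for t in range(len(sensor1)):
--         readings = [sensor1[t], sensor2[t], sensor3[t]]
--         # Majority vote
--         majority = max(set(readings), key=readings.count)
--         if readings.count(majority) > 1:
--             fused.append(majority)
--         else:
--             # No majority, take average
--             fused.append(sum(readings) // 3)
--
--     return fused
--
--     """
--     Combines sensor readings using majority vote logic.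
--     If no majority exists (all different), fall back to the average of the three readings.
--
--     Args:
--         sensor1, sensor2, sensor3 (list[int]): Readings from 3 sensors.
--
--     Returns:
--         list: Final fused readings for each timestep.
--               - Majority value if at least 2 sensors agree.
--               - Average value if no consensus.
--     """
-- ===== SOURCE B (Python) =====
-- def _fuse_one(a: int, b: int, c: int) -> int:
--     if a == b or a == c:
--         return a
--     if b == c:
--         return b
--     return (a + b + c) // 3
--
--
-- def fuse_readings(sensor1: list[int], sensor2: list[int], sensor3: list[int]) -> list:
--     return [_fuse_one(sensor1[t], sensor2[t], sensor3[t])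
--             for t in range(len(sensor1))]
-- ===== Notes on version B (the rewrite author's own statement) =====
-- stated objective: idiomatic
-- what changed: Replaces the accumulator loop with set/.count/max majority detection by a comprehension that decides each fused value via direct pairwise equality tests in a small helper, building no intermediate readings list, set or counts.
import Mathlib
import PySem

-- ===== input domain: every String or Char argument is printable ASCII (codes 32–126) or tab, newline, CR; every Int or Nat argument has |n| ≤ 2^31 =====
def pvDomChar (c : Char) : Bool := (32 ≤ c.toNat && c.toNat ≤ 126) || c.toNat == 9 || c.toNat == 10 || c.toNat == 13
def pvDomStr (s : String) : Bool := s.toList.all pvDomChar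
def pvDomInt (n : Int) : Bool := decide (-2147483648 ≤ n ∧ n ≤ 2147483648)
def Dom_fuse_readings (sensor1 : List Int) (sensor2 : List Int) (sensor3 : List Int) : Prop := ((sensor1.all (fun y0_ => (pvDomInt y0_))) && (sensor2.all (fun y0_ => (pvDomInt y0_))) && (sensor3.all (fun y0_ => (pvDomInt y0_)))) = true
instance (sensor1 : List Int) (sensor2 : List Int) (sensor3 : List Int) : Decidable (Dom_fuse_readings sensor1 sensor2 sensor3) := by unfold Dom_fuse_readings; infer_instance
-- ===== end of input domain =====

-- B replaces A's per-index set/.count/max majority detection by a comprehension deciding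
-- each fused value with direct pairwise equality tests (objective: idiomatic).

-- ===== PORT A =====
def fuse_readings (sensor1 : List Int) (sensor2 : List Int) (sensor3 : List Int) : List Int :=
  (PySem.List.pyRange 0 sensor1.length 1).foldl (fun fused t =>
    let readings : List Int :=
      [PySem.List.pyGetD sensor1 t 0, PySem.List.pyGetD sensor2 t 0, PySem.List.pyGetD sensor3 t 0]
    let majority : Int :=
      (PySem.List.max? (PySem.Set.ofList readings) (fun v => (readings.count v : Int))).getD 0
    if readings.count majority > 1 then fused ++ [majority]
    else fused ++ [PySem.Int.floordiv readings.sum 3]) []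

-- ===== PORT B =====
-- B's helper _fuse_one: early-return pairwise equality tests.
def pvFuseOne (a b c : Int) : Int :=
  if a = b ∨ a = c then a
  else if b = c then b
  else PySem.Int.floordiv (a + b + c) 3

-- B's comprehension over range(len(sensor1)) with direct indexing (valid inside Pre_).
def fuse_readings_alt (sensor1 : List Int) (sensor2 : List Int) (sensor3 : List Int) : List Int :=
  (List.range sensor1.length).map (fun (t : Nat) =>
    pvFuseOne (PySem.List.pyGetD sensor1 (Int.ofNat t) 0)
              (PySem.List.pyGetD sensor2 (Int.ofNat t) 0)
              (PySem.List.pyGetD sensor3 (Int.ofNat t) 0))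

-- ===== PRECONDITION & SPEC =====
-- A raises IndexError when sensor2 or sensor3 is shorter than sensor1; Pre_ excludes exactly
-- those inputs (B raises there too).
def Pre_fuse_readings (sensor1 : List Int) (sensor2 : List Int) (sensor3 : List Int) : Prop :=
  sensor1.length ≤ sensor2.length ∧ sensor1.length ≤ sensor3.length
instance (sensor1 : List Int) (sensor2 : List Int) (sensor3 : List Int) : Decidable (Pre_fuse_readings sensor1 sensor2 sensor3) := by unfold Pre_fuse_readings; infer_instance

def pvWitness_fuse_readings : List Int × List Int × List Int := ([1, 1, 5], [1, 2, 6], [2, 3, 7])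

def Spec_fuse_readings (sensor1 : List Int) (sensor2 : List Int) (sensor3 : List Int) (out : List Int) : Prop := out = fuse_readings_alt sensor1 sensor2 sensor3
instance (sensor1 : List Int) (sensor2 : List Int) (sensor3 : List Int) (out : List Int) : Decidable (Spec_fuse_readings sensor1 sensor2 sensor3 out) := by unfold Spec_fuse_readings; infer_instance

-- ===== CLAIM (what is proved, stated in full; the proofs are below) =====
def Claim_equal_fuse_readings : Prop := ∀ (sensor1 : List Int) (sensor2 : List Int) (sensor3 : List Int), Dom_fuse_readings sensor1 sensor2 sensor3 → Pre_fuse_readings sensor1 sensor2 sensor3 → Spec_fuse_readings sensor1 sensor2 sensor3 (fuse_readings sensor1 sensor2 sensor3)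

-- ===== LEMMAS AND PROOFS =====

-- A's per-index fused value, as a function of the three readings at that index.
def pvStepA (a b c : Int) : Int :=
  let readings : List Int := [a, b, c]
  let majority : Int :=
    (PySem.List.max? (PySem.Set.ofList readings) (fun v => (readings.count v : Int))).getD 0
  if readings.count majority > 1 then majority
  else PySem.Int.floordiv readings.sum 3

theorem pvStep_eq (a b c : Int) : pvStepA a b c = pvFuseOne a b c := by
  unfold pvStepA pvFuseOne
  by_cases hab : a = b
  · subst hab
    by_cases hac : a = c
    · subst hac
      norm_num [PySem.Set.ofList, PySem.Set.add, PySem.List.max?, List.count_cons]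
    · norm_num [PySem.Set.ofList, PySem.Set.add, PySem.List.max?, List.count_cons,
        hac, Ne.symm hac]
  · by_cases hac : a = c
    · subst hac
      norm_num [PySem.Set.ofList, PySem.Set.add, PySem.List.max?, List.count_cons,
        hab, Ne.symm hab]
    · by_cases hbc : b = c
      · subst hbc
        norm_num [PySem.Set.ofList, PySem.Set.add, PySem.List.max?, List.count_cons,
          hab, Ne.symm hab]
      · norm_num [PySem.Set.ofList, PySem.Set.add, PySem.List.max?, List.count_cons,
          hab, hac, hbc, Ne.symm hab, Ne.symm hac, Ne.symm hbc]
        rw [← add_assoc]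

theorem pvA_eq_map (s1 s2 s3 : List Int) :
    fuse_readings s1 s2 s3 =
      (List.range s1.length).map (fun (k : Nat) =>
        pvStepA (PySem.List.pyGetD s1 (Int.ofNat k) 0) (PySem.List.pyGetD s2 (Int.ofNat k) 0)
          (PySem.List.pyGetD s3 (Int.ofNat k) 0)) := by
  unfold fuse_readings
  have hbody : ∀ (fused : List Int) (t : Int),
      (let readings : List Int :=
        [PySem.List.pyGetD s1 t 0, PySem.List.pyGetD s2 t 0, PySem.List.pyGetD s3 t 0]
       let majority : Int :=
        (PySem.List.max? (PySem.Set.ofList readings) (fun v => (readings.count v : Int))).getD 0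
       if readings.count majority > 1 then fused ++ [majority]
       else fused ++ [PySem.Int.floordiv readings.sum 3])
      = fused ++ [pvStepA (PySem.List.pyGetD s1 t 0) (PySem.List.pyGetD s2 t 0) (PySem.List.pyGetD s3 t 0)] := by
    intro fused t
    simp only [pvStepA]
    split <;> rfl
  simp only [hbody]
  rw [PySem.List.foldl_append_singleton_eq_map]
  rw [PySem.List.pyRange_one]
  simp [List.map_map, Function.comp_def, Int.ofNat_eq_natCast]

-- ===== VERDICT (by name: the statement is the Claim_ definition above) =====
theorem fuse_readings_spec : Claim_equal_fuse_readings := by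
  intro s1 s2 s3 _ _
  unfold Spec_fuse_readings fuse_readings_alt
  rw [pvA_eq_map]
  simp only [pvStep_eq]
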